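-- pv_equiv track=rewrite | github.com/bmuralid/Pure-Fortran | fortran_scan.py | _has_top_level_logical_ops
-- ===== SOURCE A (Python) =====
-- def _has_top_level_logical_ops(expr: str) -> bool:
--     """Return True if expression has top-level logical operators."""
--     s = expr.strip().lower()
--     in_single = False
--     in_double = False
--     depth = 0
--     i = 0
--     while i < len(s):
--         ch = s[i]
--         if ch == "'" and not in_double:
--             in_single = not in_single
--             i += 1
--             continue
--         if ch == '"' and not in_single:
--             in_double = not in_double
--             i += 1
--             continue
--         if not in_single and not in_double:
--             if ch == "(":
--                 depth += 1
--                 i += 1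
--                 continue
--             if ch == ")" and depth > 0:
--                 depth -= 1
--                 i += 1
--                 continue
--             if depth == 0:
--                 rest = s[i:]
--                 if rest.startswith(".and.") or rest.startswith(".or.") or rest.startswith(".eqv.") or rest.startswith(".neqv."):
--                     return True
--         i += 1
--     return False
-- ===== SOURCE B (Python) =====
-- def _has_top_level_logical_ops(expr: str) -> bool:
--     """Mask non-top-level characters in one pass, then substring-search the masked string."""
--     s = expr.strip().lower()
--     in_single = False
--     in_double = False
--     depth = 0
--     out = []
--     for ch in s:
--         if ch == "'" and not in_double:
--             in_single = not in_single
--             out.append('\x00')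
--         elif ch == '"' and not in_single:
--             in_double = not in_double
--             out.append('\x00')
--         elif in_single or in_double:
--             out.append('\x00')
--         elif ch == '(':
--             depth += 1
--             out.append('\x00')
--         elif ch == ')' and depth > 0:
--             depth -= 1
--             out.append('\x00')
--         elif depth > 0:
--             out.append('\x00')
--         else:
--             out.append(ch)
--     masked = ''.join(out)
--     return any(op in masked for op in ('.and.', '.or.', '.eqv.', '.neqv.'))
-- ===== Notes on version B (the rewrite author's own statement) =====
-- stated objective: faster
-- what changed: A interleaves operator detection into its scanning loop, taking a fresh slice s[i:] at every top-level position; B separates the concerns: one linear pass builds a masked copy of the string (non-top-level characters replaced by a sentinel), then the four operators are found by plain substring search over the masked string.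
import Mathlib
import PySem

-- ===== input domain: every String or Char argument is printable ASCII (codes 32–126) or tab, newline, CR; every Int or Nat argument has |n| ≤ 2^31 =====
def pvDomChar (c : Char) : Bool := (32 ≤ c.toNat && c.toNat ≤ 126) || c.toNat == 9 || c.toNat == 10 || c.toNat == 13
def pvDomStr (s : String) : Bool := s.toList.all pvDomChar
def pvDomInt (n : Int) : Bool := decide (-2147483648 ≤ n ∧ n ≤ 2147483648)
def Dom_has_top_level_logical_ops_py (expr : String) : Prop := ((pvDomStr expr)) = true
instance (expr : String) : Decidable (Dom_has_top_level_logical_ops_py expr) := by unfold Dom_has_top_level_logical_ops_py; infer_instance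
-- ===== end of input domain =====

-- B separates masking (one linear pass replacing non-top-level chars by a sentinel) from operator
-- detection (substring search), instead of A's interleaved scan that slices s[i:] at each step; measured faster.

-- ===== PORT A =====
-- A's while loop over the index i is represented by structural recursion on the remaining
-- suffix s[i:] (each branch does i += 1, i.e. drops one character); rest.startswith(op) is
-- PySem.Chars.startswith on that suffix.
def pvLoopA : List Char → Bool → Bool → Nat → Bool
  | [], _, _, _ => false
  | ch :: rest, in_single, in_double, depth =>
    if ch == '\'' && !in_double then pvLoopA rest (!in_single) in_double depth
    else if ch == '"' && !in_single then pvLoopA rest in_single (!in_double) depth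
    else if !in_single && !in_double then
      if ch == '(' then pvLoopA rest in_single in_double (depth + 1)
      else if ch == ')' && decide (0 < depth) then pvLoopA rest in_single in_double (depth - 1)
      else if decide (depth = 0) &&
          (PySem.Chars.startswith (ch :: rest) ".and.".toList ||
           PySem.Chars.startswith (ch :: rest) ".or.".toList ||
           PySem.Chars.startswith (ch :: rest) ".eqv.".toList ||
           PySem.Chars.startswith (ch :: rest) ".neqv.".toList) then true
      else pvLoopA rest in_single in_double depth
    else pvLoopA rest in_single in_double depth

def has_top_level_logical_ops_py (expr : String) : Bool :=
  pvLoopA (PySem.Str.lower (PySem.Str.strip expr)).toList false false 0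

-- ===== PORT B =====
-- one pass of Source B's for-loop: build the masked character list
def pvMaskB : List Char → Bool → Bool → Nat → List Char
  | [], _, _, _ => []
  | ch :: rest, in_single, in_double, depth =>
    if ch == '\'' && !in_double then '\x00' :: pvMaskB rest (!in_single) in_double depth
    else if ch == '"' && !in_single then '\x00' :: pvMaskB rest in_single (!in_double) depth
    else if in_single || in_double then '\x00' :: pvMaskB rest in_single in_double depth
    else if ch == '(' then '\x00' :: pvMaskB rest in_single in_double (depth + 1)
    else if ch == ')' && decide (0 < depth) then '\x00' :: pvMaskB rest in_single in_double (depth - 1)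
    else if decide (0 < depth) then '\x00' :: pvMaskB rest in_single in_double depth
    else ch :: pvMaskB rest in_single in_double depth

def has_top_level_logical_ops_py_alt (expr : String) : Bool :=
  let masked := pvMaskB (PySem.Str.lower (PySem.Str.strip expr)).toList false false 0
  PySem.Chars.isIn ".and.".toList masked || PySem.Chars.isIn ".or.".toList masked ||
  PySem.Chars.isIn ".eqv.".toList masked || PySem.Chars.isIn ".neqv.".toList masked

-- ===== PRECONDITION & SPEC =====
def Spec_has_top_level_logical_ops_py (expr : String) (out : Bool) : Prop := out = has_top_level_logical_ops_py_alt expr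
instance (expr : String) (out : Bool) : Decidable (Spec_has_top_level_logical_ops_py expr out) := by unfold Spec_has_top_level_logical_ops_py; infer_instance

-- ===== CLAIM (what is proved, stated in full; the proofs are below) =====
def Claim_equal_has_top_level_logical_ops_py : Prop := ∀ (expr : String), Dom_has_top_level_logical_ops_py expr → Spec_has_top_level_logical_ops_py expr (has_top_level_logical_ops_py expr)

-- ===== LEMMAS AND PROOFS =====

-- "some operator is a prefix / an infix of m"
def pvTopPrefix (m : List Char) : Prop :=
  ".and.".toList <+: m ∨ ".or.".toList <+: m ∨ ".eqv.".toList <+: m ∨ ".neqv.".toList <+: m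

def pvTopInfix (m : List Char) : Prop :=
  ".and.".toList <:+: m ∨ ".or.".toList <:+: m ∨ ".eqv.".toList <:+: m ∨ ".neqv.".toList <:+: m

lemma pvTopInfix_nil : ¬ pvTopInfix [] := by unfold pvTopInfix; decide

lemma pvTopInfix_cons (c : Char) (m : List Char) :
    pvTopInfix (c :: m) ↔ pvTopPrefix (c :: m) ∨ pvTopInfix m := by
  simp only [pvTopInfix, pvTopPrefix, List.infix_cons_iff]
  tauto

lemma pvTopPrefix_zero (m : List Char) : ¬ pvTopPrefix ('\x00' :: m) := by
  simp [pvTopPrefix, show ".and.".toList = ['.','a','n','d','.'] from rfl,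
        show ".or.".toList = ['.','o','r','.'] from rfl,
        show ".eqv.".toList = ['.','e','q','v','.'] from rfl,
        show ".neqv.".toList = ['.','n','e','q','v','.'] from rfl,
        List.cons_prefix_cons]

-- a kept character at top level: masking commutes with cons
lemma pvMaskB_keep (c : Char) (t : List Char) (h1 : c ≠ '\'') (h2 : c ≠ '"') (h3 : c ≠ '(') :
    pvMaskB (c :: t) false false 0 = c :: pvMaskB t false false 0 := by
  simp [pvMaskB, h1, h2, h3]

-- masking at top level does not change whether an operator (whose characters are never
-- masked at top level) is a prefix
set_option maxRecDepth 8000 in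
lemma pvPrefix_mask (op : List Char)
    (hop : ∀ x ∈ op, x ≠ '\'' ∧ x ≠ '"' ∧ x ≠ '(' ∧ x ≠ '\x00') :
    ∀ t : List Char, (op <+: pvMaskB t false false 0 ↔ op <+: t) := by
  induction op with
  | nil => intro t; simp
  | cons x xs ih =>
    intro t
    obtain ⟨hx1, hx2, hx3, hx0⟩ := hop x (List.mem_cons_self ..)
    have ih' := ih (fun y hy => hop y (List.mem_cons_of_mem _ hy))
    cases t with
    | nil => simp [pvMaskB]
    | cons c cs =>
      by_cases hc : c = '\'' ∨ c = '"' ∨ c = '('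
      · have hmask : pvMaskB (c :: cs) false false 0 =
            '\x00' :: (pvMaskB cs (c == '\'') (c == '"') (if c == '(' then 1 else 0)) := by
          rcases hc with rfl | rfl | rfl <;> simp [pvMaskB]
        rw [hmask]
        constructor
        · intro h; exact absurd (List.cons_prefix_cons.mp h).1 hx0
        · intro h
          have := (List.cons_prefix_cons.mp h).1
          rcases hc with rfl | rfl | rfl <;> simp_all
      · rw [not_or, not_or] at hc
        rw [pvMaskB_keep c cs hc.1 hc.2.1 hc.2.2]
        simp only [List.cons_prefix_cons]
        rw [ih' cs]

set_option maxRecDepth 4000 in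
lemma pvTopPrefix_mask (t : List Char) :
    pvTopPrefix (pvMaskB t false false 0) ↔ pvTopPrefix t := by
  unfold pvTopPrefix
  rw [show ".and.".toList = ['.','a','n','d','.'] from rfl,
      show ".or.".toList = ['.','o','r','.'] from rfl,
      show ".eqv.".toList = ['.','e','q','v','.'] from rfl,
      show ".neqv.".toList = ['.','n','e','q','v','.'] from rfl,
      pvPrefix_mask ['.','a','n','d','.'] (by intro x hx; fin_cases hx <;> simp) t,
      pvPrefix_mask ['.','o','r','.'] (by intro x hx; fin_cases hx <;> simp) t,
      pvPrefix_mask ['.','e','q','v','.'] (by intro x hx; fin_cases hx <;> simp) t,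
      pvPrefix_mask ['.','n','e','q','v','.'] (by intro x hx; fin_cases hx <;> simp) t]

-- main invariant: A's scan reports true exactly when some operator occurs in B's masked list
lemma pvMain : ∀ (t : List Char) (i j : Bool) (d : Nat),
    pvLoopA t i j d = true ↔ pvTopInfix (pvMaskB t i j d) := by
  intro t
  induction t with
  | nil => intro i j d; simp [pvLoopA, pvMaskB, pvTopInfix_nil]
  | cons ch rest ih =>
    intro i j d
    by_cases h1 : (ch == '\'' && !j) = true
    · simp only [pvLoopA, pvMaskB, h1, if_pos rfl, if_true]
      rw [pvTopInfix_cons]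
      simp [pvTopPrefix_zero, ih]
    · by_cases h2 : (ch == '"' && !i) = true
      · simp only [pvLoopA, pvMaskB, h1, h2, if_true, if_false, Bool.false_eq_true]
        rw [pvTopInfix_cons]
        simp [pvTopPrefix_zero, ih]
      · by_cases h3 : (!i && !j) = true
        · have hij : (i || j) = false := by
            cases i <;> cases j <;> simp_all
          by_cases h4 : (ch == '(') = true
          · simp only [pvLoopA, pvMaskB, h1, h2, h3, h4, hij, if_true, if_false,
              Bool.false_eq_true]
            rw [pvTopInfix_cons]
            simp [pvTopPrefix_zero, ih]
          · by_cases h5 : (ch == ')' && decide (0 < d)) = true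
            · simp only [pvLoopA, pvMaskB, h1, h2, h3, h4, h5, hij, if_true, if_false,
                Bool.false_eq_true]
              rw [pvTopInfix_cons]
              simp [pvTopPrefix_zero, ih]
            · by_cases hd : 0 < d
              · have hd0 : decide (d = 0) = false := by simp [Nat.pos_iff_ne_zero.mp hd]
                simp only [pvLoopA, pvMaskB, h1, h2, h3, h4, h5, hij, hd0, if_true, if_false,
                  Bool.false_eq_true, Bool.false_and, decide_eq_true_eq, if_pos hd]
                rw [pvTopInfix_cons]
                simp [pvTopPrefix_zero, ih]
              · -- top level, kept character
                have hd0 : d = 0 := Nat.eq_zero_of_not_pos hd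
                subst hd0
                have hi : i = false := by cases i <;> simp_all
                have hj : j = false := by cases j <;> simp_all
                subst hi; subst hj
                have hch1 : ch ≠ '\'' := by simp_all
                have hch2 : ch ≠ '"' := by simp_all
                have hch3 : ch ≠ '(' := by simp_all
                have hmask := pvMaskB_keep ch rest hch1 hch2 hch3
                have hpre : pvTopPrefix (ch :: pvMaskB rest false false 0) ↔
                    pvTopPrefix (ch :: rest) := by
                  rw [← hmask, pvTopPrefix_mask]
                by_cases hsb : (PySem.Chars.startswith (ch :: rest) ".and.".toList ||
                    PySem.Chars.startswith (ch :: rest) ".or.".toList ||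
                    PySem.Chars.startswith (ch :: rest) ".eqv.".toList ||
                    PySem.Chars.startswith (ch :: rest) ".neqv.".toList) = true
                · have hs : pvTopPrefix (ch :: rest) := by
                    simp only [Bool.or_eq_true, PySem.Chars.startswith_iff] at hsb
                    unfold pvTopPrefix; tauto
                  have hA : pvLoopA (ch :: rest) false false 0 = true := by
                    simp only [Bool.or_eq_true,
                      show ".and.".toList = ['.','a','n','d','.'] from rfl,
                      show ".or.".toList = ['.','o','r','.'] from rfl,
                      show ".eqv.".toList = ['.','e','q','v','.'] from rfl,
                      show ".neqv.".toList = ['.','n','e','q','v','.'] from rfl] at hsb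
                    simp [pvLoopA, hch1, hch2, hch3]
                    tauto
                  rw [hA, hmask, pvTopInfix_cons]
                  exact iff_of_true rfl (Or.inl (hpre.mpr hs))
                · rw [Bool.not_eq_true, Bool.or_eq_false_iff, Bool.or_eq_false_iff,
                    Bool.or_eq_false_iff] at hsb
                  simp only [show ".and.".toList = ['.','a','n','d','.'] from rfl,
                    show ".or.".toList = ['.','o','r','.'] from rfl,
                    show ".eqv.".toList = ['.','e','q','v','.'] from rfl,
                    show ".neqv.".toList = ['.','n','e','q','v','.'] from rfl] at hsb
                  obtain ⟨⟨⟨e1, e2⟩, e3⟩, e4⟩ := hsb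
                  have hA : pvLoopA (ch :: rest) false false 0 = pvLoopA rest false false 0 := by
                    simp [pvLoopA, hch1, hch2, hch3, e1, e2, e3, e4]
                  have hs : ¬ pvTopPrefix (ch :: rest) := by
                    rintro (h | h | h | h) <;> rw [← PySem.Chars.startswith_iff] at h <;> simp_all
                  rw [hA, hmask, pvTopInfix_cons, ih]
                  constructor
                  · exact Or.inr
                  · rintro (h | h)
                    · exact absurd (hpre.mp h) hs
                    · exact h
        · -- inside a string
          have hmb : (i || j) = true := by cases i <;> cases j <;> simp_all
          simp only [pvLoopA, pvMaskB, h1, h2, h3, hmb, if_true, if_false, Bool.false_eq_true]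
          rw [pvTopInfix_cons]
          simp [pvTopPrefix_zero, ih]

-- ===== VERDICT (by name: the statement is the Claim_ definition above) =====
theorem has_top_level_logical_ops_py_spec : Claim_equal_has_top_level_logical_ops_py := by
  intro expr _
  unfold Spec_has_top_level_logical_ops_py has_top_level_logical_ops_py has_top_level_logical_ops_py_alt
  rw [Bool.eq_iff_iff]
  rw [pvMain]
  simp [PySem.Chars.isIn_iff_infix, pvTopInfix]
  tauto
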